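-- pv_equiv track=rewrite | github.com/Pistonight/botw-research-scripts | src/tasks/build_recipe_index.py | convert_to_recipe_set
-- ===== SOURCE A (Python) =====
-- def convert_to_recipe_set(max: int, data: dict[str, set[int]]) -> tuple[dict[str, tuple[int, int]], str | None]:
--     if max > 64*2:
--         return None, "Too many recipes to index" # type: ignore
--
--     output = {}
--     for key in data:
--         s = data[key]
--
--         a1 = 0
--         for i in range(0, 64):
--             if i in s:
--                 a1 = (a1 | (1 << i))
--         a2 = 0
--         for i in range(64, max):
--             if i in s:
--                 a2 = (a2 | (1 << (i-64)))
--
--         output[key] = (a1, a2)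
--
--     return output, None
-- ===== SOURCE B (Python) =====
-- def convert_to_recipe_set(max: int, data: dict[str, set[int]]) -> tuple[dict[str, tuple[int, int]], str | None]:
--     if max > 128:
--         return None, "Too many recipes to index"  # type: ignore
--
--     hi = max if max > 64 else 64
--     output = {}
--     for key, s in data.items():
--         full = 0
--         for i in s:
--             if 0 <= i < hi:
--                 full |= 1 << i
--         output[key] = (full & ((1 << 64) - 1), full >> 64)
--     return output, None
-- ===== Notes on version B (the rewrite author's own statement) =====
-- stated objective: alternative
-- what changed: Instead of two 64-entry range loops probing set membership to build each half-mask separately, B builds one combined up-to-128-bit mask in a single pass over the set's elements and then splits it into the two 64-bit halves with a mask and a shift.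
import Mathlib
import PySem

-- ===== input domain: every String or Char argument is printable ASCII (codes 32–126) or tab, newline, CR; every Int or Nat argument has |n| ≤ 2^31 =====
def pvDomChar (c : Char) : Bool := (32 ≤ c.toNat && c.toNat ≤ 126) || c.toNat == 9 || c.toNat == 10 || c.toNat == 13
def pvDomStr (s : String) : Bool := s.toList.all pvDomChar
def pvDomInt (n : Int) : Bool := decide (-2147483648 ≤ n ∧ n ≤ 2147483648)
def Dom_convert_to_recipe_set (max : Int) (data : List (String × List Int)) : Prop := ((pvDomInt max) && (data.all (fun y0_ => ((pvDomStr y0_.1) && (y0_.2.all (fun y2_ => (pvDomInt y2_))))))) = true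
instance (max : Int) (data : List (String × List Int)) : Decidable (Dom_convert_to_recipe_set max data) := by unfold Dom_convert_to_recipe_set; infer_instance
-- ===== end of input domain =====

-- B replaces A's two index-range loops probing set membership by a single pass over the
-- set's elements building one combined mask, split afterwards by mask/shift (alternative
-- decomposition, not measured faster).

-- ===== PORT A =====
def convert_to_recipe_set (max : Int) (data : List (String × List Int)) : (Option (List (String × Int × Int))) × Option String :=
  if max > 64 * 2 then (none, some "Too many recipes to index")
  else
    let output : PySem.Dict String (Int × Int) :=
      data.foldl (fun output kv =>
        let s := kv.2
        let a1 := (PySem.List.pyRange 0 64 1).foldl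
          (fun (a1 : Int) (i : Int) => if s.contains i then PySem.Int.bor a1 ((1 : Int) <<< i.toNat) else a1) 0
        let a2 := (PySem.List.pyRange 64 max 1).foldl
          (fun (a2 : Int) (i : Int) => if s.contains i then PySem.Int.bor a2 ((1 : Int) <<< (i - 64).toNat) else a2) 0
        output.insert kv.1 (a1, a2)) PySem.Dict.empty
    (some output.items, none)

-- ===== PORT B =====
def convert_to_recipe_set_alt (max : Int) (data : List (String × List Int)) : (Option (List (String × Int × Int))) × Option String :=
  if max > 128 then (none, some "Too many recipes to index")
  else
    let hi : Int := if max > 64 then max else 64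
    let output : PySem.Dict String (Int × Int) :=
      data.foldl (fun output kv =>
        let full := kv.2.foldl
          (fun (f : Int) (i : Int) => if 0 ≤ i ∧ i < hi then PySem.Int.bor f ((1 : Int) <<< i.toNat) else f) 0
        output.insert kv.1 (PySem.Int.band full (((1 : Int) <<< (64 : Nat)) - 1), full >>> (64 : Nat))) PySem.Dict.empty
    (some output.items, none)

-- ===== PRECONDITION & SPEC =====
def Spec_convert_to_recipe_set (max : Int) (data : List (String × List Int)) (out : (Option (List (String × Int × Int))) × Option String) : Prop := out = convert_to_recipe_set_alt max data
instance (max : Int) (data : List (String × List Int)) (out : (Option (List (String × Int × Int))) × Option String) : Decidable (Spec_convert_to_recipe_set max data out) := by unfold Spec_convert_to_recipe_set; infer_instance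

-- ===== CLAIM (what is proved, stated in full; the proofs are below) =====
def Claim_equal_convert_to_recipe_set : Prop := ∀ (max : Int) (data : List (String × List Int)), Dom_convert_to_recipe_set max data → Spec_convert_to_recipe_set max data (convert_to_recipe_set max data)

-- ===== LEMMAS AND PROOFS =====

theorem pvToNatFold (p : Int → Prop) [DecidablePred p] (g : Int → Nat) :
    ∀ (l : List Int) (n : Nat),
      l.foldl (fun (a : Int) i => if p i then PySem.Int.bor a (((1 <<< g i : Nat) : Int)) else a) (n : Int)
        = ((l.foldl (fun a i => if p i then a ||| (1 <<< g i) else a) n : Nat) : Int) := by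
  intro l
  induction l with
  | nil => intro n; rfl
  | cons hd tl ih =>
    intro n
    by_cases h : p hd
    · rw [List.foldl_cons, List.foldl_cons, if_pos h, if_pos h, PySem.Int.bor_natCast, ih]
    · rw [List.foldl_cons, List.foldl_cons, if_neg h, if_neg h, ih]

theorem pvToNatFold0 (p : Int → Prop) [DecidablePred p] (g : Int → Nat) (l : List Int) :
    l.foldl (fun (a : Int) i => if p i then PySem.Int.bor a (((1 <<< g i : Nat) : Int)) else a) 0
      = ((l.foldl (fun a i => if p i then a ||| (1 <<< g i) else a) 0 : Nat) : Int) := by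
  simpa using pvToNatFold p g l 0

theorem pvTestBitFold (p : Int → Prop) [DecidablePred p] (g : Int → Nat) :
    ∀ (l : List Int) (n : Nat) (k : Nat),
      ((l.foldl (fun a i => if p i then a ||| (1 <<< g i) else a) n).testBit k
        ↔ (n.testBit k ∨ ∃ i ∈ l, p i ∧ g i = k)) := by
  intro l
  induction l with
  | nil => intro n k; simp
  | cons hd tl ih =>
    intro n k
    rw [List.foldl_cons]
    by_cases h : p hd
    · rw [if_pos h, ih]
      have h2 : (1 <<< g hd : Nat) = 2 ^ g hd := by rw [Nat.shiftLeft_eq, one_mul]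
      rw [Nat.testBit_lor, h2, Nat.testBit_two_pow]
      simp only [Bool.or_eq_true, decide_eq_true_eq, List.mem_cons]
      constructor
      · rintro (⟨hb | hb⟩ | ⟨i, hi, hp, hg⟩)
        · exact Or.inl hb
        · exact Or.inr ⟨hd, Or.inl rfl, h, hb⟩
        · exact Or.inr ⟨i, Or.inr hi, hp, hg⟩
      · rintro (hb | ⟨i, hi | hi, hp, hg⟩)
        · exact Or.inl (Or.inl hb)
        · subst hi; exact Or.inl (Or.inr hg)
        · exact Or.inr ⟨i, hi, hp, hg⟩
    · rw [if_neg h, ih]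
      simp only [List.mem_cons]
      constructor
      · rintro (hb | ⟨i, hi, hp, hg⟩)
        · exact Or.inl hb
        · exact Or.inr ⟨i, Or.inr hi, hp, hg⟩
      · rintro (hb | ⟨i, hi | hi, hp, hg⟩)
        · exact Or.inl hb
        · subst hi; exact absurd hp h
        · exact Or.inr ⟨i, hi, hp, hg⟩

theorem pvA1 (hi : Int) (hhi : 64 ≤ hi) (s : List Int) :
    (PySem.List.pyRange 0 64 1).foldl
        (fun a i => if s.contains i then a ||| (1 <<< i.toNat) else a) (0 : Nat)
      = (s.foldl (fun a i => if 0 ≤ i ∧ i < hi then a ||| (1 <<< i.toNat) else a) (0 : Nat))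
          &&& (2 ^ 64 - 1) := by
  apply Nat.eq_of_testBit_eq
  intro k
  rw [Nat.testBit_land, Nat.testBit_two_pow_sub_one]
  rw [Bool.eq_iff_iff]
  rw [pvTestBitFold (fun i => s.contains i = true) Int.toNat]
  simp only [Bool.and_eq_true, decide_eq_true_eq, Nat.zero_testBit, Bool.false_eq_true, false_or,
    PySem.List.mem_pyRange_one]
  rw [pvTestBitFold (fun i => 0 ≤ i ∧ i < hi) Int.toNat]
  simp only [Nat.zero_testBit, Bool.false_eq_true, false_or]
  constructor
  · rintro ⟨i, ⟨h0, h64⟩, hc, hg⟩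
    exact ⟨⟨i, by simpa using hc, ⟨h0, by omega⟩, hg⟩, by omega⟩
  · rintro ⟨⟨i, hc, ⟨h0, hlt⟩, hg⟩, hk⟩
    exact ⟨i, ⟨h0, by omega⟩, by simpa using hc, hg⟩

theorem pvA2 (max : Int) (s : List Int) :
    (PySem.List.pyRange 64 max 1).foldl
        (fun a i => if s.contains i then a ||| (1 <<< (i - 64).toNat) else a) (0 : Nat)
      = (s.foldl (fun a i => if 0 ≤ i ∧ i < (if max > 64 then max else 64) then a ||| (1 <<< i.toNat) else a) (0 : Nat))
          >>> 64 := by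
  apply Nat.eq_of_testBit_eq
  intro k
  rw [Nat.testBit_shiftRight, Bool.eq_iff_iff]
  rw [pvTestBitFold (fun i => s.contains i = true) (fun i => (i - 64).toNat)]
  rw [pvTestBitFold (fun i => 0 ≤ i ∧ i < (if max > 64 then max else 64)) Int.toNat]
  simp only [Nat.zero_testBit, Bool.false_eq_true, false_or, PySem.List.mem_pyRange_one]
  constructor
  · rintro ⟨i, ⟨h64, hmax⟩, hc, hg⟩
    have hgt : max > 64 := by omega
    refine ⟨i, by simpa using hc, ⟨by omega, by simp [hgt]; omega⟩, by omega⟩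
  · rintro ⟨i, hc, ⟨h0, hlt⟩, hg⟩
    have hlt' : i < max ∨ i < 64 := by
      by_cases h : max > 64 <;> simp [h] at hlt <;> omega
    refine ⟨i, ⟨by omega, by omega⟩, by simpa using hc, by omega⟩

theorem pvShr (n : Nat) : ((n : Int) >>> (64 : Nat)) = ((n >>> 64 : Nat) : Int) := by
  simp

theorem pvMask : ((1 : Int) <<< (64 : Nat)) - 1 = ((2 ^ 64 - 1 : Nat) : Int) := by
  rw [Int.shiftLeft_eq]
  norm_num

-- the two per-key bitmask pairs coincide
theorem pvKey (max : Int) (s : List Int) :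
    ((PySem.List.pyRange 0 64 1).foldl
        (fun (a1 : Int) (i : Int) => if s.contains i then PySem.Int.bor a1 ((1 : Int) <<< i.toNat) else a1) 0,
      (PySem.List.pyRange 64 max 1).foldl
        (fun (a2 : Int) (i : Int) => if s.contains i then PySem.Int.bor a2 ((1 : Int) <<< (i - 64).toNat) else a2) 0)
      = (let full := s.foldl
          (fun (f : Int) (i : Int) => if 0 ≤ i ∧ i < (if max > 64 then max else 64) then PySem.Int.bor f ((1 : Int) <<< i.toNat) else f) 0
         (PySem.Int.band full (((1 : Int) <<< (64 : Nat)) - 1), full >>> (64 : Nat))) := by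
  have hsh : ∀ i : Int, (1 : Int) <<< i.toNat = (((1 <<< i.toNat : Nat)) : Int) := by
    intro i; simp [Int.shiftLeft_eq, Nat.shiftLeft_eq]
  simp only [hsh]
  rw [pvToNatFold0 (fun i => s.contains i = true) Int.toNat,
      pvToNatFold0 (fun i => s.contains i = true) (fun i => (i - 64).toNat),
      pvToNatFold0 (fun i => 0 ≤ i ∧ i < (if max > 64 then max else 64)) Int.toNat]
  rw [pvMask, PySem.Int.band_natCast, pvShr]
  exact Prod.ext_iff.mpr
    ⟨congrArg (fun n : Nat => (n : Int)) (pvA1 (if max > 64 then max else 64) (by split <;> omega) s),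
     congrArg (fun n : Nat => (n : Int)) (pvA2 max s)⟩

-- the two dict-building folds coincide
theorem pvOuter (max : Int) :
    ∀ (data : List (String × List Int)) (d : PySem.Dict String (Int × Int)),
      data.foldl (fun output kv =>
        let s := kv.2
        let a1 := (PySem.List.pyRange 0 64 1).foldl
          (fun (a1 : Int) (i : Int) => if s.contains i then PySem.Int.bor a1 ((1 : Int) <<< i.toNat) else a1) 0
        let a2 := (PySem.List.pyRange 64 max 1).foldl
          (fun (a2 : Int) (i : Int) => if s.contains i then PySem.Int.bor a2 ((1 : Int) <<< (i - 64).toNat) else a2) 0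
        output.insert kv.1 (a1, a2)) d
      = data.foldl (fun output kv =>
        let full := kv.2.foldl
          (fun (f : Int) (i : Int) => if 0 ≤ i ∧ i < (if max > 64 then max else 64) then PySem.Int.bor f ((1 : Int) <<< i.toNat) else f) 0
        output.insert kv.1 (PySem.Int.band full (((1 : Int) <<< (64 : Nat)) - 1), full >>> (64 : Nat))) d := by
  intro data
  induction data with
  | nil => intro d; rfl
  | cons kv tl ih =>
    intro d
    simp only [List.foldl_cons]
    rw [pvKey max kv.2]
    exact ih _

-- ===== VERDICT (by name: the statement is the Claim_ definition above) =====
theorem convert_to_recipe_set_spec : Claim_equal_convert_to_recipe_set := by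
  intro max data _
  unfold Spec_convert_to_recipe_set convert_to_recipe_set convert_to_recipe_set_alt
  have hguard : ((64 : Int) * 2) = 128 := by norm_num
  rw [hguard]
  by_cases h : max > 128
  · simp [h]
  · simp only [h, if_false]
    rw [pvOuter max data PySem.Dict.empty]
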